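-- pv_equiv track=rewrite | github.com/LukasAltmann/masters_thesis | util.py | find_loops
-- ===== SOURCE A (Python) =====
-- def find_loops(arr):
--     # Initialize an empty dictionary to store the indices at which each element appears.
--     indices = {}
--     loops = []
--     # Iterate through the array.
--     for i, elem in enumerate(arr):
--         # If the current element has already been seen, add the loop to the list of loops.
--         if elem in indices:
--             start_index = indices[elem]
--             loop = arr[start_index:i + 1]
--             if len(loop) != len(arr):
--                 loops.append(loop)
--
--         # Otherwise, store the current index in the dictionary.
--         indices[elem] = i
--
--     # Return the list of loops.
--     return loops
-- ===== SOURCE B (Python) =====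
-- def find_loops(arr):
--     # Staged algorithm: (1) group all indices by element into a full index map,
--     # (2) emit one (end, slice) pair per consecutive occurrence gap, skipping
--     # full-length spans, (3) order the slices by their end index.
--     n = len(arr)
--     positions = {}
--     for i, x in enumerate(arr):
--         positions.setdefault(x, []).append(i)
--     pairs = []
--     for idxs in positions.values():
--         for p, q in zip(idxs, idxs[1:]):
--             if q - p + 1 != n:
--                 pairs.append((q, arr[p:q + 1]))
--     pairs.sort(key=lambda t: t[0])
--     return [s for _, s in pairs]
-- ===== Notes on version B (the rewrite author's own statement) =====
-- stated objective: alternative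
-- what changed: B works in three staged passes: it first builds a full element-to-index-list map in one pass, then emits one (end,slice) pair per consecutive occurrence gap per element, and finally sorts the pairs by end index to restore A's emission order, instead of A's single pass with a running last-index dictionary.
import Mathlib
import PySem

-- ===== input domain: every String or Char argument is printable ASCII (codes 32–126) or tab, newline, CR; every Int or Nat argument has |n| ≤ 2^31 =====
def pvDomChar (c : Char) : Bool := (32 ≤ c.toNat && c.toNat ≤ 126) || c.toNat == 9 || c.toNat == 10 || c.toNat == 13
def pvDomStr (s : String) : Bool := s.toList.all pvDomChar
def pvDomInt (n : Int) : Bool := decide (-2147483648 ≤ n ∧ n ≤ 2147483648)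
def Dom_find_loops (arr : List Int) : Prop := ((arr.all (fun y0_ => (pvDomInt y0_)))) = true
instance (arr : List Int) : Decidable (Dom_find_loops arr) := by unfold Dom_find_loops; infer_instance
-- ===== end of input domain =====

-- B re-solves the task in three staged passes — build a full element→indices map,
-- emit one (end, slice) pair per consecutive-occurrence gap, then order the pairs by
-- end index — instead of A's single pass with a running last-index dictionary
-- (objective: alternative decomposition, same asymptotic cost).


-- ===== PORT A =====
-- A's loop body: dict of last indices, append the slice when the element was seen.
def stepA (arr : List Int) (st : PySem.Dict Int Int × List (List Int)) (ie : Int × Int) :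
    PySem.Dict Int Int × List (List Int) :=
  match st.1.get? ie.2 with
  | some start_index =>
      let loop := PySem.List.slice arr (some start_index) (some (ie.1 + 1))
      (st.1.insert ie.2 ie.1, if loop.length ≠ arr.length then st.2 ++ [loop] else st.2)
  | none => (st.1.insert ie.2 ie.1, st.2)

def find_loops (arr : List Int) : List (List Int) :=
  ((PySem.List.enumerate arr).foldl (stepA arr) (PySem.Dict.empty, [])).2

-- ===== PORT B =====
-- Source B: (1) full index map, (2) (end, slice) pair per consecutive gap, (3) sort by end.
def find_loops_alt (arr : List Int) : List (List Int) :=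
  let n : Int := (arr.length : Int)
  let positions : PySem.Dict Int (List Int) :=
    (PySem.List.enumerate arr).foldl
      (fun d ix => d.modify ix.2 [] (fun l => l ++ [ix.1])) PySem.Dict.empty
  let pairs : List (Int × List Int) :=
    positions.values.foldl
      (fun acc idxs =>
        (idxs.zip (PySem.List.slice idxs (some 1) none)).foldl
          (fun acc pq =>
            if pq.2 - pq.1 + 1 ≠ n then
              acc ++ [(pq.2, PySem.List.slice arr (some pq.1) (some (pq.2 + 1)))]
            else acc)
          acc)
      []
  (PySem.List.sorted pairs (fun t => t.1)).map (fun t => t.2)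

-- ===== PRECONDITION & SPEC =====
def Spec_find_loops (arr : List Int) (out : List (List Int)) : Prop := out = find_loops_alt arr
instance (arr : List Int) (out : List (List Int)) : Decidable (Spec_find_loops arr out) := by unfold Spec_find_loops; infer_instance

-- ===== CLAIM (what is proved, stated in full; the proofs are below) =====
def Claim_equal_find_loops : Prop := ∀ (arr : List Int), Dom_find_loops arr → Spec_find_loops arr (find_loops arr)

-- ===== LEMMAS AND PROOFS =====

-- Indices i < k with arr[i] = v, ascending (proof-side specification).
def occU (arr : List Int) (k : Nat) (v : Int) : List Nat :=
  (List.range k).filter (fun i => arr.getD i 0 == v)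

-- All indices of v in arr, ascending.
def occF (arr : List Int) (v : Int) : List Nat := occU arr arr.length v

def castL (xs : List Nat) : List Int := xs.map Int.ofNat

-- Last occurrence of v among arr[0..k-1].
def lastIdx (arr : List Int) (k : Nat) (v : Int) : Option Nat := (occU arr k v).getLast?

-- The (end, slice) pair generated by an occurrence gap (p, q).
def mkPair (arr : List Int) (pq : Nat × Nat) : Int × List Int :=
  ((pq.2 : Int), PySem.List.slice arr (some (pq.1 : Int)) (some ((pq.2 : Int) + 1)))

def predL (arr : List Int) (pr : Int × List Int) : Bool := decide (pr.2.length ≠ arr.length)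

-- Canonical gap list in ascending end order (A's emission order), as Nat pairs.
def natRhs (arr : List Int) (k : Nat) : List (Nat × Nat) :=
  (List.range k).filterMap (fun q => (lastIdx arr q (arr.getD q 0)).map (fun p => (p, q)))

def canonU (arr : List Int) (k : Nat) : List (Int × List Int) := (natRhs arr k).map (mkPair arr)

def canonOut (arr : List Int) (k : Nat) : List (List Int) :=
  ((canonU arr k).filter (predL arr)).map (fun pr => pr.2)

-- Adjacent pairs of a list.
def adjN (xs : List Nat) : List (Nat × Nat) := xs.zip xs.tail

-- B's gap list grouped by element (keys in first-occurrence order), as Nat pairs.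
def natLhs (arr : List Int) : List (Nat × Nat) :=
  (PySem.Set.ofList arr).flatMap (fun v => adjN (occF arr v))

theorem occU_succ (arr : List Int) (k : Nat) (v : Int) :
    occU arr (k + 1) v = occU arr k v ++ (if arr.getD k 0 == v then [k] else []) := by
  unfold occU
  rw [List.range_succ, List.filter_append, List.filter_cons, List.filter_nil]

theorem lastIdx_succ (arr : List Int) (k : Nat) (v : Int) :
    lastIdx arr (k + 1) v = if arr.getD k 0 == v then some k else lastIdx arr k v := by
  unfold lastIdx
  rw [occU_succ, List.getLast?_append]
  by_cases h : (arr.getD k 0 == v) = true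
  · rw [if_pos h, if_pos h]
    simp
  · rw [if_neg h, if_neg h]
    simp

theorem natRhs_succ (arr : List Int) (k : Nat) :
    natRhs arr (k + 1)
      = natRhs arr k ++ ((lastIdx arr k (arr.getD k 0)).map (fun p => (p, k))).toList := by
  unfold natRhs
  rw [List.range_succ, List.filterMap_append, List.filterMap_cons, List.filterMap_nil]
  cases o : lastIdx arr k (arr.getD k 0) <;> rfl

-- ========== A side: the fold state is (lastIdx, canonOut) ==========

theorem invariantA (arr : List Int) (k : Nat) (hk : k ≤ arr.length) :
    (∀ x, ((((PySem.List.enumerate arr).take k).foldl (stepA arr) (PySem.Dict.empty, [])).1).get? x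
        = (lastIdx arr k x).map (fun j => (j : Int))) ∧
    (((PySem.List.enumerate arr).take k).foldl (stepA arr) (PySem.Dict.empty, [])).2
        = canonOut arr k := by
  induction k with
  | zero =>
    simp [lastIdx, occU, canonOut, canonU, natRhs, PySem.Dict.get?, PySem.Dict.empty]
  | succ k ih =>
    have hlt : k < arr.length := hk
    obtain ⟨ihd, ihl⟩ := ih (Nat.le_of_lt hlt)
    have htake : (PySem.List.enumerate arr).take (k + 1)
        = (PySem.List.enumerate arr).take k ++ [((k : Int), arr[k])] := by
      rw [List.take_add_one, PySem.List.getElem?_enumerate arr 0 k, List.getElem?_eq_getElem hlt]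
      simp
    rw [htake, List.foldl_append]
    set st := ((PySem.List.enumerate arr).take k).foldl (stepA arr) (PySem.Dict.empty, []) with hst
    simp only [List.foldl_cons, List.foldl_nil]
    have hgetD : arr.getD k 0 = arr[k] := List.getD_eq_getElem arr 0 hlt
    have hgetk : st.1.get? arr[k] = (lastIdx arr k arr[k]).map (fun j => (j : Int)) := ihd arr[k]
    have hdict : ∀ x, (st.1.insert arr[k] (k : Int)).get? x
        = (lastIdx arr (k + 1) x).map (fun j => (j : Int)) := by
      intro x
      rw [lastIdx_succ, hgetD]
      by_cases hx : x = arr[k]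
      · subst hx
        rw [PySem.Dict.get?_insert_self]
        simp
      · rw [PySem.Dict.get?_insert_of_ne _ _ hx, ihd]
        have : (arr[k] == x) = false := by simpa using fun h => hx h.symm
        simp [this]
    have hcanon : canonOut arr (k + 1)
        = canonOut arr k ++
          ((((lastIdx arr k (arr.getD k 0)).map (fun p => (p, k))).toList.map (mkPair arr)).filter
            (predL arr)).map (fun pr => pr.2) := by
      unfold canonOut canonU
      rw [natRhs_succ, List.map_append, List.filter_append, List.map_append]
    cases hL : lastIdx arr k arr[k] with
    | none =>
      have hstep : stepA arr st ((k : Int), arr[k]) = (st.1.insert arr[k] (k : Int), st.2) := by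
        unfold stepA
        rw [hgetk, hL]
        rfl
      rw [hstep]
      refine ⟨hdict, ?_⟩
      rw [ihl, hcanon, hgetD, hL]
      simp
    | some j =>
      have hstep : stepA arr st ((k : Int), arr[k])
          = (st.1.insert arr[k] (k : Int),
             if (PySem.List.slice arr (some (j : Int)) (some ((k : Int) + 1))).length ≠ arr.length
             then st.2 ++ [PySem.List.slice arr (some (j : Int)) (some ((k : Int) + 1))]
             else st.2) := by
        unfold stepA
        rw [hgetk, hL]
        rfl
      rw [hstep]
      refine ⟨hdict, ?_⟩
      rw [hcanon, hgetD, hL, ihl]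
      simp only [Option.map_some, Option.toList_some, List.map_cons, List.map_nil]
      unfold mkPair predL
      simp only [List.filter_cons, List.filter_nil]
      by_cases hc : (PySem.List.slice arr (some (j : Int)) (some ((k : Int) + 1))).length ≠ arr.length
      · rw [if_pos hc]
        simp [hc]
      · rw [if_neg hc]
        simp at hc
        simp [hc]

-- ========== B side ==========

-- B's index map: keys and per-key index lists.
theorem positions_keys (arr : List Int) :
    ((PySem.List.enumerate arr).foldl
      (fun d ix => d.modify ix.2 [] (fun l => l ++ [ix.1])) PySem.Dict.empty).keys
      = PySem.Set.ofList arr := by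
  rw [PySem.Dict.keys_foldl_modify_key (PySem.List.enumerate arr) (fun ix => ix.2) []
      (fun _ ix => fun l => l ++ [ix.1]) PySem.Dict.empty]
  rw [PySem.List.map_snd_enumerate]
  simp [PySem.Set.update, PySem.Set.ofList_eq_foldl, PySem.Dict.keys_empty]

theorem positions_keys_nodup (arr : List Int) :
    ((PySem.List.enumerate arr).foldl
      (fun d ix => d.modify ix.2 [] (fun l => l ++ [ix.1])) PySem.Dict.empty).keys.Nodup := by
  exact PySem.Dict.nodup_keys_foldl_modify_key (PySem.List.enumerate arr) (fun ix => ix.2) []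
    (fun _ ix => fun l => l ++ [ix.1]) PySem.Dict.empty (by simp [PySem.Dict.keys_empty])

theorem positions_getD (arr : List Int) (c : Int) :
    ((PySem.List.enumerate arr).foldl
      (fun d ix => d.modify ix.2 [] (fun l => l ++ [ix.1])) PySem.Dict.empty).getD c []
      = castL (occF arr c) := by
  have hswap : (PySem.List.enumerate arr).foldl
      (fun d ix => d.modify ix.2 [] (fun l => l ++ [ix.1])) PySem.Dict.empty
      = ((PySem.List.enumerate arr).map Prod.swap).foldl
          (fun d p => d.modify p.1 [] (fun l => l ++ [p.2])) PySem.Dict.empty := by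
    rw [List.foldl_map]
    rfl
  rw [hswap, PySem.Dict.getD_foldl_modify_append]
  rw [PySem.List.enumerate_eq_map_pyRange arr 0, PySem.List.len]
  rw [PySem.List.pyRange_zero_natCast]
  unfold occF occU castL
  simp [Function.comp_def, Prod.swap, PySem.List.pyGetD_natCast, List.filter_map,
    Int.ofNat_eq_natCast]

-- Adjacent pairs of a strictly increasing list are increasing.
theorem adjN_lt (xs : List Nat) (hp : xs.Pairwise (· < ·)) :
    ∀ pq ∈ adjN xs, pq.1 < pq.2 := by
  induction xs with
  | nil => intro pq h; simp [adjN] at h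
  | cons y ys ih =>
    intro pq hmem
    cases ys with
    | nil => simp [adjN] at hmem
    | cons z zs =>
      have hmem' : pq = (y, z) ∨ pq ∈ adjN (z :: zs) := by
        simpa [adjN] using hmem
      rcases hmem' with h | h
      · subst h
        exact (List.pairwise_cons.mp hp).1 z (by simp)
      · exact ih (List.pairwise_cons.mp hp).2 pq h

theorem occF_pairwise (arr : List Int) (v : Int) : (occF arr v).Pairwise (· < ·) :=
  List.Pairwise.filter _ (List.pairwise_lt_range)

theorem mem_occF_lt (arr : List Int) (v : Int) (i : Nat) (h : i ∈ occF arr v) :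
    i < arr.length := by
  unfold occF occU at h
  have := List.mem_of_mem_filter h
  simpa using this

-- The per-element pair generator of B, written on Nat index lists.
theorem group_transform (arr : List Int) (v : Int) :
    (((castL (occF arr v)).zip ((castL (occF arr v)).tail)).filter
          (fun pq => decide (pq.2 - pq.1 + 1 ≠ (arr.length : Int)))).map
        (fun pq => (pq.2, PySem.List.slice arr (some pq.1) (some (pq.2 + 1))))
      = ((adjN (occF arr v)).map (mkPair arr)).filter (predL arr) := by
  set L := occF arr v with hL
  unfold castL
  rw [← List.map_tail, List.zip_map, List.filter_map, List.map_map]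
  simp only [Function.comp_def, Prod.map]
  rw [List.filter_map]
  have hpw : L.Pairwise (· < ·) := occF_pairwise arr v
  have hmem : ∀ i ∈ L, i < arr.length := fun i hi => mem_occF_lt arr v i hi
  have hcond : ∀ pq ∈ L.zip L.tail,
      (decide (Int.ofNat pq.2 - Int.ofNat pq.1 + 1 ≠ (arr.length : Int)))
      = (predL arr ∘ mkPair arr) pq := by
    intro pq hpq
    have hlt : pq.1 < pq.2 := adjN_lt L hpw pq hpq
    have hq : pq.2 < arr.length := hmem pq.2 (List.mem_of_mem_tail (List.of_mem_zip hpq).2)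
    have hlen : (PySem.List.slice arr (some ((pq.1 : Nat) : Int)) (some (((pq.2 : Nat) : Int) + 1))).length
        = pq.2 + 1 - pq.1 := by
      rw [PySem.List.length_slice]
      have h1 : (((pq.2 : Nat) : Int) + 1) = ((pq.2 + 1 : Nat) : Int) := by push_cast; ring
      rw [h1, PySem.List.clampIdx_natCast, PySem.List.clampIdx_natCast]
      omega
    simp only [Function.comp, predL, mkPair, hlen, Int.ofNat_eq_natCast]
    apply decide_eq_decide.mpr
    constructor <;> intro h <;> intro hc <;> apply h <;> omega
  rw [show adjN L = L.zip L.tail from rfl]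
  refine Eq.trans (congrArg (List.map _) (List.filter_congr hcond)) ?_
  apply List.map_congr_left
  intro pq _
  simp [mkPair, Int.ofNat_eq_natCast]

-- Update one group of a flatMap over distinct keys: the new element moves to the end.
theorem flatMap_update_perm {κ β : Type} (l : List κ) (hnd : l.Nodup) (x : κ) (hx : x ∈ l)
    (f f' : κ → List β) (e : β) (hagree : ∀ v ∈ l, v ≠ x → f' v = f v)
    (hfx : f' x = f x ++ [e]) : (l.flatMap f').Perm (l.flatMap f ++ [e]) := by
  induction l with
  | nil => simp at hx
  | cons y ys ih =>
    rcases List.mem_cons.mp hx with h | h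
    · subst h
      have hys : ys.flatMap f' = ys.flatMap f := by
        apply List.flatMap_congr
        intro v hv
        exact hagree v (by simp [hv]) (fun he => (List.nodup_cons.mp hnd).1 (he ▸ hv))
      simp only [List.flatMap_cons, hfx, hys]
      rw [List.append_assoc, List.append_assoc]
      exact List.Perm.append_left _ (List.perm_append_comm)
    · have hy : y ≠ x := fun he => (List.nodup_cons.mp hnd).1 (he ▸ h)
      have hfy : f' y = f y := hagree y (by simp) hy
      simp only [List.flatMap_cons, hfy, List.append_assoc]
      exact List.Perm.append_left _
        (ih (List.nodup_cons.mp hnd).2 h (fun v hv hne => hagree v (by simp [hv]) hne))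

theorem getD_append_lt (arr : List Int) (x : Int) (i : Nat) (h : i < arr.length) :
    (arr ++ [x]).getD i 0 = arr.getD i 0 := List.getD_append arr [x] 0 i h

theorem getD_append_self (arr : List Int) (x : Int) :
    (arr ++ [x]).getD arr.length 0 = x := by
  simp [List.getD_eq_getElem?_getD]

theorem occU_append (arr : List Int) (x : Int) (k : Nat) (hk : k ≤ arr.length) (v : Int) :
    occU (arr ++ [x]) k v = occU arr k v := by
  unfold occU
  apply List.filter_congr
  intro i hi
  rw [getD_append_lt arr x i (lt_of_lt_of_le (List.mem_range.mp hi) hk)]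

theorem occF_append (arr : List Int) (x : Int) (v : Int) :
    occF (arr ++ [x]) v = occF arr v ++ (if x == v then [arr.length] else []) := by
  unfold occF
  have hlen : (arr ++ [x]).length = arr.length + 1 := by simp
  rw [hlen, occU_succ, occU_append arr x arr.length (le_refl _) v, getD_append_self]

theorem occF_eq_nil_of_not_mem (arr : List Int) (x : Int) (hx : x ∉ arr) :
    occF arr x = [] := by
  unfold occF occU
  rw [List.filter_eq_nil_iff]
  intro i hi
  have hilt := List.mem_range.mp hi
  have : arr.getD i 0 = arr[i] := List.getD_eq_getElem arr 0 hilt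
  simp only [this, beq_iff_eq]
  intro he
  exact hx (he ▸ List.getElem_mem hilt)

theorem occF_ne_nil_of_mem (arr : List Int) (x : Int) (hx : x ∈ arr) :
    occF arr x ≠ [] := by
  obtain ⟨i, hi, he⟩ := List.mem_iff_getElem.mp hx
  have : i ∈ occF arr x := by
    unfold occF occU
    rw [List.mem_filter]
    refine ⟨List.mem_range.mpr hi, ?_⟩
    rw [List.getD_eq_getElem arr 0 hi]
    simp [he]
  intro hnil
  rw [hnil] at this
  simp at this

theorem adjN_append (xs : List Nat) (a : Nat) :
    adjN (xs ++ [a]) = adjN xs ++ (match xs.getLast? with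
      | some l => [(l, a)]
      | none => []) := by
  induction xs with
  | nil => simp [adjN]
  | cons y ys ih =>
    cases ys with
    | nil => simp [adjN]
    | cons z zs =>
      have h1 : adjN ((y :: z :: zs) ++ [a]) = (y, z) :: adjN ((z :: zs) ++ [a]) := by
        simp [adjN]
      have h2 : adjN (y :: z :: zs) = (y, z) :: adjN (z :: zs) := by simp [adjN]
      rw [h1, ih, h2]
      simp

theorem natRhs_append (arr : List Int) (x : Int) :
    natRhs (arr ++ [x]) (arr.length + 1)
      = natRhs arr arr.length ++ (((occF arr x).getLast?).map
          (fun p => (p, arr.length))).toList := by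
  rw [natRhs_succ]
  congr 1
  · unfold natRhs
    apply List.filterMap_congr
    intro q hq
    have hqlt := List.mem_range.mp hq
    rw [getD_append_lt arr x q hqlt]
    unfold lastIdx
    rw [occU_append arr x q (le_of_lt hqlt)]
  · rw [getD_append_self]
    unfold lastIdx occF
    rw [occU_append arr x arr.length (le_refl _)]

theorem natLhs_perm (arr : List Int) : (natLhs arr).Perm (natRhs arr arr.length) := by
  induction arr using List.reverseRecOn with
  | nil => simp [natLhs, natRhs]
  | append_singleton arr x ih =>
    unfold natLhs
    rw [show (arr ++ [x]).length = arr.length + 1 by simp, natRhs_append]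
    have hset : PySem.Set.ofList (arr ++ [x]) = PySem.Set.add (PySem.Set.ofList arr) x := by
      simp [PySem.Set.ofList_eq_foldl]
    by_cases hx : x ∈ arr
    · have hxs : x ∈ PySem.Set.ofList arr := (PySem.Set.mem_ofList arr x).mpr hx
      have hadd : PySem.Set.add (PySem.Set.ofList arr) x = PySem.Set.ofList arr := by
        unfold PySem.Set.add
        rw [if_pos (by simpa [PySem.Set.contains] using hxs)]
      rw [hset, hadd]
      have hne := occF_ne_nil_of_mem arr x hx
      have hlast : (occF arr x).getLast? = some ((occF arr x).getLast hne) :=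
        List.getLast?_eq_some_getLast hne
      have hfx : adjN (occF (arr ++ [x]) x)
          = adjN (occF arr x) ++ [((occF arr x).getLast hne, arr.length)] := by
        rw [occF_append]
        simp only [beq_self_eq_true, if_pos]
        rw [adjN_append, hlast]
      have hperm := flatMap_update_perm (PySem.Set.ofList arr)
        (PySem.Set.nodup_ofList arr) x hxs
        (fun v => adjN (occF arr v)) (fun v => adjN (occF (arr ++ [x]) v))
        ((occF arr x).getLast hne, arr.length)
        (fun v _ hvx => by
          show adjN (occF (arr ++ [x]) v) = adjN (occF arr v)
          rw [occF_append]
          have : (x == v) = false := by simpa using fun h => hvx h.symm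
          simp [this])
        hfx
      rw [hlast]
      exact hperm.trans (List.Perm.append_right _ ih)
    · have hxs : x ∉ PySem.Set.ofList arr := fun h => hx ((PySem.Set.mem_ofList arr x).mp h)
      have hadd : PySem.Set.add (PySem.Set.ofList arr) x = PySem.Set.ofList arr ++ [x] := by
        unfold PySem.Set.add
        rw [if_neg (by simpa [PySem.Set.contains] using hxs)]
      rw [hset, hadd, List.flatMap_append]
      have hocc : occF arr x = [] := occF_eq_nil_of_not_mem arr x hx
      have hx1 : adjN (occF (arr ++ [x]) x) = [] := by
        rw [occF_append, hocc]
        simp [adjN]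
      have hlast : (occF arr x).getLast? = none := by rw [hocc]; rfl
      rw [hlast]
      have hcong : (PySem.Set.ofList arr).flatMap (fun v => adjN (occF (arr ++ [x]) v))
          = (PySem.Set.ofList arr).flatMap (fun v => adjN (occF arr v)) := by
        apply List.flatMap_congr
        intro v hv
        have hvx : (x == v) = false := by
          simp only [beq_eq_false_iff_ne, ne_eq]
          intro he
          exact hx (he ▸ (PySem.Set.mem_ofList arr v).mp hv)
        show adjN (occF (arr ++ [x]) v) = adjN (occF arr v)
        rw [occF_append, hvx]
        simp
      rw [hcong]
      simpa [hx1] using ih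

theorem natRhs_pairwise (arr : List Int) (k : Nat) :
    (natRhs arr k).Pairwise (fun a b => a.2 < b.2) := by
  unfold natRhs
  apply List.Pairwise.filterMap
  · intro a b hab pq hpq pq' hpq'
    simp only [Option.map_eq_some_iff] at hpq hpq'
    obtain ⟨p, _, rfl⟩ := hpq
    obtain ⟨p', _, rfl⟩ := hpq'
    exact hab
  · exact List.pairwise_lt_range

-- B's result is the filtered canonical list.
theorem altEq (arr : List Int) : find_loops_alt arr = canonOut arr arr.length := by
  unfold find_loops_alt
  simp only []
  have hkeys := positions_keys arr
  have hnodup := positions_keys_nodup arr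
  have hvalues : ((PySem.List.enumerate arr).foldl
      (fun d ix => d.modify ix.2 [] (fun l => l ++ [ix.1])) PySem.Dict.empty).values
      = (PySem.Set.ofList arr).map (fun v => castL (occF arr v)) := by
    rw [PySem.Dict.values_eq_map_keys _ hnodup []]
    rw [hkeys]
    apply List.map_congr_left
    intro v _
    exact positions_getD arr v
  rw [hvalues]
  -- inner fold: append of the filtered mapped adjacent pairs
  have hinner : ∀ (acc : List (Int × List Int)) (idxs : List Int),
      (idxs.zip (PySem.List.slice idxs (some 1) none)).foldl
        (fun acc pq =>
          if pq.2 - pq.1 + 1 ≠ (arr.length : Int) then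
            acc ++ [(pq.2, PySem.List.slice arr (some pq.1) (some (pq.2 + 1)))]
          else acc)
        acc
      = acc ++ ((idxs.zip idxs.tail).filter
          (fun pq => decide (pq.2 - pq.1 + 1 ≠ (arr.length : Int)))).map
          (fun pq => (pq.2, PySem.List.slice arr (some pq.1) (some (pq.2 + 1)))) := by
    intro acc idxs
    rw [PySem.List.slice_from_one]
    exact PySem.List.foldl_append_ite _ _ _ _
  have houter : ((PySem.Set.ofList arr).map
        (fun v => castL (occF arr v))).foldl
      (fun acc idxs =>
        (idxs.zip (PySem.List.slice idxs (some 1) none)).foldl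
          (fun acc pq =>
            if pq.2 - pq.1 + 1 ≠ (arr.length : Int) then
              acc ++ [(pq.2, PySem.List.slice arr (some pq.1) (some (pq.2 + 1)))]
            else acc)
          acc)
      []
      = (PySem.Set.ofList arr).flatMap
          (fun v => ((adjN (occF arr v)).map (mkPair arr)).filter (predL arr)) := by
    rw [List.foldl_map]
    have hbody : ∀ (acc : List (Int × List Int)) (v : Int), v ∈ PySem.Set.ofList arr →
        (((castL (occF arr v)).zip
            (PySem.List.slice (castL (occF arr v)) (some 1) none)).foldl
          (fun acc pq =>
            if pq.2 - pq.1 + 1 ≠ (arr.length : Int) then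
              acc ++ [(pq.2, PySem.List.slice arr (some pq.1) (some (pq.2 + 1)))]
            else acc)
          acc)
        = acc ++ ((adjN (occF arr v)).map (mkPair arr)).filter (predL arr) := by
      intro acc v _
      rw [hinner, group_transform]
    calc ((PySem.Set.ofList arr)).foldl _ []
        = (PySem.Set.ofList arr).foldl
            (fun acc v => acc ++ ((adjN (occF arr v)).map (mkPair arr)).filter (predL arr)) [] := by
          apply PySem.List.foldl_congr_mem
          intro acc v hv
          exact hbody acc v hv
      _ = _ := by
          rw [PySem.List.foldl_append_eq_flatMap]
          simp
  rw [houter]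
  -- pull the filter out of the flatMap, recognise the Nat-pair form
  have hsplit : (PySem.Set.ofList arr).flatMap
      (fun v => ((adjN (occF arr v)).map (mkPair arr)).filter (predL arr))
      = ((natLhs arr).map (mkPair arr)).filter (predL arr) := by
    rw [← List.filter_flatMap]
    congr 1
    unfold natLhs
    exact Eq.symm List.map_flatMap
  rw [hsplit]
  -- the sort restores the canonical ascending-end order
  have hperm : (((canonU arr arr.length).filter (predL arr))).Perm
      (((natLhs arr).map (mkPair arr)).filter (predL arr)) := by
    unfold canonU
    exact ((natLhs_perm arr).map (mkPair arr)).filter (predL arr) |>.symm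
  have hpw : ((canonU arr arr.length).filter (predL arr)).Pairwise
      (fun a b => (fun t : Int × List Int => t.1) a < (fun t : Int × List Int => t.1) b) := by
    have hpw2 : (canonU arr arr.length).Pairwise
        (fun a b => (fun t : Int × List Int => t.1) a < (fun t : Int × List Int => t.1) b) := by
      unfold canonU
      apply List.Pairwise.map
      · intro a b hab
        simp only [mkPair]
        exact_mod_cast hab
      · exact natRhs_pairwise arr arr.length
    exact List.Pairwise.sublist List.filter_sublist hpw2
  rw [PySem.List.sorted_eq_of_perm_of_pairwise_lt _ _ _ hperm hpw]
  rfl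

theorem aEq (arr : List Int) : find_loops arr = canonOut arr arr.length := by
  unfold find_loops
  have h := (invariantA arr arr.length (le_refl _)).2
  rwa [List.take_of_length_le (by rw [PySem.List.length_enumerate])] at h

-- ===== VERDICT (by name: the statement is the Claim_ definition above) =====
theorem find_loops_spec : Claim_equal_find_loops := by
  intro arr _
  unfold Spec_find_loops
  rw [aEq, altEq]
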